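-- pv_equiv track=rewrite | github.com/pjj11005/Coding_Test | Baekjoon/week24/2300.py | min_count
-- ===== SOURCE A (Python) =====
-- def min_count(n, array):
--     array.sort()  # x좌표 기준 정렬
--     dp = [float("inf")] * (n + 1)  # dp
--     dp[0] = 0
--
--     # 통신폭 최소합 구하기
--     for i in range(1, n + 1):
--         max_height = 0
--         for j in range(i, 0, -1):
--             width = array[i - 1][0] - array[j - 1][0]  # 너비
--             max_height = max(max_height, array[j - 1][1])  # 최대 y값
--             square = max(width, max_height * 2)  # 너비와 높이 중 최대
--             dp[i] = min(dp[i], dp[j - 1] + square)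
--
--     return dp[n]
-- ===== SOURCE B (Python) =====
-- def min_count(n, array):
--     # Top-down memoized recursion over a sorted copy (does not mutate `array`,
--     # unlike A, which sorts it in place; the return value is the same).
--     # For each block end i the heights' suffix maxima over pts[t:i] are staged
--     # in a list first, so the candidate minimum is then taken left-to-right.
--     pts = sorted(array)
--     memo = {}
--
--     def solve(i):
--         if i == 0:
--             return 0
--         if i in memo:
--             return memo[i]
--         xi = pts[i - 1][0]
--         suf = [0] * (i + 1)  # suf[t] = max height among pts[t:i]
--         for t in range(i - 1, -1, -1):
--             suf[t] = max(pts[t][1], suf[t + 1])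
--         best = min(solve(j - 1) + max(xi - pts[j - 1][0], 2 * suf[j - 1])
--                    for j in range(1, i + 1))
--         memo[i] = best
--         return best
--
--     return solve(n)
-- ===== Notes on version B (the rewrite author's own statement) =====
-- stated objective: alternative
-- what changed: Replaces A's bottom-up DP table filled by nested index loops (backward inner scan carrying a running max and min-updating dp[i] in place) with a top-down memoized recursion solve(i) that, per block end, first stages the heights' suffix maxima in a list and then takes the candidate minimum in one ascending min(...) pass; no dp array and no float('inf') sentinel.
import Mathlib
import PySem

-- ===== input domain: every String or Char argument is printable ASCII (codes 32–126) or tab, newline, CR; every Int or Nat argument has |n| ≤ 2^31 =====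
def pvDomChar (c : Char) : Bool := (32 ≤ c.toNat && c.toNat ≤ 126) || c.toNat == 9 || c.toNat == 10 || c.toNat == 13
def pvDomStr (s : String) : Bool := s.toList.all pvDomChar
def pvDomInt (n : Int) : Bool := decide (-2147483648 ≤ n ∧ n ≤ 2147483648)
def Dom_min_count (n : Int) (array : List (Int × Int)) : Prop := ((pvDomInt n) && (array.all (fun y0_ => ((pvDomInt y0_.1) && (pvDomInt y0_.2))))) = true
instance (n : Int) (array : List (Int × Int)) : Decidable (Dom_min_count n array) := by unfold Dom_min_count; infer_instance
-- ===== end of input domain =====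

-- B replaces A's bottom-up DP table (nested index loops, backward running-max scan,
-- in-place min updates into dp[i]) with a top-down memoized recursion that stages the
-- heights' suffix maxima in a list and takes the candidate minimum ascending.
-- Note: A sorts `array` in place, B does not; the equivalence proved is about the return value.

-- ===== PORT A =====
-- Python's float('inf') dp entries are modelled as `none`; `omin` is Python's
-- min with inf = none (exact: all finite dp values are ints).
def omin : Option Int → Option Int → Option Int
  | none, b => b
  | some a, none => some a
  | some a, some b => some (min a b)

-- inner loop `for j in range(i, 0, -1)`: the obvious countdown recursion;
-- the counter is Python's j, so at pattern `k+1` Python's j-1 is k.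
def innerA (arr : List (Int × Int)) (i : Int) : Nat → Int → List (Option Int) → List (Option Int)
  | 0, _, dp => dp
  | k+1, max_height, dp =>
      let width := (PySem.List.pyGetD arr (i - 1) (0, 0)).1 - (PySem.List.pyGetD arr (k : Int) (0, 0)).1
      let mh := max max_height (PySem.List.pyGetD arr (k : Int) (0, 0)).2
      let square := max width (mh * 2)
      let cand := (PySem.List.pyGetD dp (k : Int) none).map (· + square)
      innerA arr i k mh (PySem.List.pySetD dp i (omin (PySem.List.pyGetD dp i none) cand))

def min_count (n : Int) (array : List (Int × Int)) : Int :=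
  let arr := PySem.List.sorted2 array (fun p => p.1) (fun p => p.2)   -- array.sort(): tuple order
  let dp0 := PySem.List.pySetD (List.replicate (n + 1).toNat (none : Option Int)) 0 (some 0)
  let dp := (PySem.List.pyRange 1 (n + 1) 1).foldl (fun dp i => innerA arr i i.toNat 0 dp) dp0
  (PySem.List.pyGetD dp n none).getD 0

-- ===== PORT B =====
-- `suf = [0]*(i+1); for t in range(i-1,-1,-1): suf[t] = max(pts[t][1], suf[t+1])`:
-- the list is built back-to-front, each new head from the previous head.
def sufGo (pts : List (Int × Int)) : Nat → List Int → List Int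
  | 0, acc => acc
  | t+1, acc => sufGo pts t (max (pts.getD t (0, 0)).2 (acc.headD 0) :: acc)

-- `solve(i)` with the memo dict threaded explicitly; `innerB` is the ascending
-- `min(... for j in range(1, i+1))` generator (right-combined; min on Int is ACI).
mutual
def solveB (pts : List (Int × Int)) (i : Nat) (memo : PySem.Dict Int Int) : Int × PySem.Dict Int Int :=
  if i = 0 then (0, memo)
  else match memo.get? (i : Int) with
  | some v => (v, memo)
  | none =>
    let xi := (pts.getD (i - 1) (0, 0)).1
    let suf := sufGo pts i [0]
    let r := innerB pts xi suf i 1 memo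
    let best := r.1.getD 0   -- i ≥ 1, so the generator is nonempty and r.1 is `some`
    (best, r.2.insert (i : Int) best)
termination_by (i, i + 2)
decreasing_by all_goals simp_wf; omega

def innerB (pts : List (Int × Int)) (xi : Int) (suf : List Int) (i j : Nat) (memo : PySem.Dict Int Int) : Option Int × PySem.Dict Int Int :=
  if _h : 1 ≤ j ∧ j ≤ i then
    let p := solveB pts (j - 1) memo
    let cand := p.1 + max (xi - (pts.getD (j - 1) (0, 0)).1) (2 * suf.getD (j - 1) 0)
    let rest := innerB pts xi suf i (j + 1) p.2
    (some (match rest.1 with | none => cand | some r => min cand r), rest.2)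
  else (none, memo)
termination_by (i, i + 2 - j)
decreasing_by all_goals simp_wf; omega
end

def min_count_alt (n : Int) (array : List (Int × Int)) : Int :=
  let pts := PySem.List.sorted2 array (fun p => p.1) (fun p => p.2)   -- sorted(array): tuple order
  (solveB pts n.toNat PySem.Dict.empty).1

-- ===== PRECONDITION & SPEC =====
-- Pre_ excludes exactly the inputs where A raises IndexError: n < 0 or n > len(array).
def Pre_min_count (n : Int) (array : List (Int × Int)) : Prop := 0 ≤ n ∧ n ≤ array.length
instance (n : Int) (array : List (Int × Int)) : Decidable (Pre_min_count n array) := by unfold Pre_min_count; infer_instance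
def pvWitness_min_count : Int × (List (Int × Int)) := (3, [(4, 1), (1, 2), (3, 1)])

def Spec_min_count (n : Int) (array : List (Int × Int)) (out : Int) : Prop := out = min_count_alt n array
instance (n : Int) (array : List (Int × Int)) (out : Int) : Decidable (Spec_min_count n array out) := by unfold Spec_min_count; infer_instance

-- ===== CLAIM (what is proved, stated in full; the proofs are below) =====
def Claim_equal_min_count : Prop := ∀ (n : Int) (array : List (Int × Int)), Dom_min_count n array → Pre_min_count n array → Spec_min_count n array (min_count n array)

-- ===== LEMMAS AND PROOFS =====

-- max of the y's of pts[a .. a+k) together with 0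
def maxYF (pts : List (Int × Int)) : Nat → Nat → Int
  | 0, _ => 0
  | k+1, a => max (pts.getD a (0, 0)).2 (maxYF pts k (a+1))

-- reference table: bTab pts i = [best 0, …, best i], the new entry computed by
-- the descending scan `scanT` (A's inner-loop shape, reading earlier entries via f)
def scanT (pts : List (Int × Int)) (f : Nat → Int) (x : Int) : Nat → Int → Option Int → Option Int
  | 0, _, cur => cur
  | k+1, mh, cur =>
      let q := pts.getD k (0, 0)
      let mh' := max mh q.2
      let cand := f k + max (x - q.1) (2 * mh')
      scanT pts f x k mh' (some (match cur with | none => cand | some c => if cand < c then cand else c))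

def bTab (pts : List (Int × Int)) : Nat → List Int
  | 0 => [0]
  | i+1 =>
      bTab pts i ++ [(scanT pts (fun s => (bTab pts i).getD s 0) (pts.getD i (0, 0)).1 (i+1) 0 none).getD 0]

def bestv (pts : List (Int × Int)) (i : Nat) : Int := (bTab pts i).getD i 0

-- the min-accumulator both inner loops fold with (Python: running `min`, seed "empty")
def mstep (cur : Option Int) (v : Int) : Option Int :=
  some (match cur with | none => v | some c => min c v)

def InvM (pts : List (Int × Int)) (memo : PySem.Dict Int Int) : Prop :=
  ∀ (m : Nat) (v : Int), memo.get? (m : Int) = some v → v = bestv pts m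

lemma maxYF_nonneg (pts : List (Int × Int)) : ∀ (k a : Nat), 0 ≤ maxYF pts k a := by
  intro k
  induction k with
  | zero => intro a; simp [maxYF]
  | succ k ih => intro a; simp only [maxYF]; exact le_max_of_le_right (ih (a+1))

lemma maxYF_snoc (pts : List (Int × Int)) :
    ∀ (k a : Nat), maxYF pts (k+1) a = max (maxYF pts k a) (pts.getD (a+k) (0, 0)).2 := by
  intro k
  induction k with
  | zero => intro a; simp [maxYF, max_comm]
  | succ k ih =>
    intro a
    show max (pts.getD a (0,0)).2 (maxYF pts (k+1) (a+1)) = _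
    rw [ih (a+1), show a + (k+1) = a+1+k from by omega, ← max_assoc]
    rfl

lemma bTab_length (pts : List (Int × Int)) : ∀ i, (bTab pts i).length = i + 1 := by
  intro i
  induction i with
  | zero => rfl
  | succ i ih => simp [bTab, ih]

lemma bTab_prefix (pts : List (Int × Int)) :
    ∀ (k m : Nat), m ≤ k → (bTab pts k).getD m 0 = bestv pts m := by
  intro k
  induction k with
  | zero => intro m hm; interval_cases m; rfl
  | succ k ih =>
    intro m hm
    by_cases h : m ≤ k
    · show (bTab pts k ++ [_]).getD m 0 = bestv pts m
      rw [List.getD_eq_getElem?_getD, List.getElem?_append_left (by rw [bTab_length]; omega),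
        ← List.getD_eq_getElem?_getD]
      exact ih m h
    · have : m = k + 1 := by omega
      subst this
      rfl

lemma scanT_some (pts : List (Int × Int)) (f : Nat → Int) (x : Int) :
    ∀ (j : Nat) (mh : Int) (c : Int), ∃ v, scanT pts f x j mh (some c) = some v := by
  intro j
  induction j with
  | zero => intro mh c; exact ⟨c, rfl⟩
  | succ k ih => intro mh c; simpa [scanT] using ih _ _

lemma scanT_congr (pts : List (Int × Int)) (f g : Nat → Int) (x : Int) :
    ∀ (j : Nat) (mh : Int) (cur : Option Int), (∀ s, s < j → f s = g s) →
      scanT pts f x j mh cur = scanT pts g x j mh cur := by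
  intro j
  induction j with
  | zero => intro mh cur _; rfl
  | succ k ih =>
    intro mh cur h
    simp only [scanT, h k (Nat.lt_succ_self k)]
    exact ih _ _ (fun s hs => h s (Nat.lt_succ_of_lt hs))

-- bestv (i+1) is `some`-extracted from the descending scan over the prefix table
lemma bestv_succ (pts : List (Int × Int)) (k : Nat) :
    scanT pts (bestv pts) (pts.getD k (0, 0)).1 (k+1) 0 none = some (bestv pts (k+1)) := by
  have hc : scanT pts (bestv pts) (pts.getD k (0, 0)).1 (k+1) 0 none
      = scanT pts (fun s => (bTab pts k).getD s 0) (pts.getD k (0, 0)).1 (k+1) 0 none := by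
    apply scanT_congr
    intro s hs
    exact (bTab_prefix pts k s (by omega)).symm
  obtain ⟨v, hv⟩ : ∃ v, scanT pts (fun s => (bTab pts k).getD s 0) (pts.getD k (0, 0)).1 (k+1) 0 none = some v := by
    rw [scanT.eq_def]
    exact scanT_some _ _ _ _ _ _
  rw [hc, hv]
  congr 1
  symm
  show (bTab pts k ++ [(scanT pts (fun s => (bTab pts k).getD s 0) (pts.getD k (0, 0)).1 (k+1) 0 none).getD 0]).getD (k+1) 0 = v
  rw [List.getD_eq_getElem?_getD, List.getElem?_append_right (by rw [bTab_length]),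
    bTab_length]
  simp only [List.getD_eq_getElem?_getD] at hv
  simp [hv]

lemma omin_some (cur : Option Int) (v : Int) :
    omin cur (some v) = some (match cur with | none => v | some c => if v < c then v else c) := by
  cases cur with
  | none => rfl
  | some c =>
    simp only [omin, min_def]
    congr 1
    split_ifs <;> omega

-- ---- A's inner loop is the descending scan writing into dp[i] ----
lemma innerA_eq (arr : List (Int × Int)) (f : Nat → Int) (ii : Nat) :
    ∀ (j : Nat) (mh : Int) (dp : List (Option Int)), j ≤ ii → ii < dp.length →
      (∀ m : Nat, m < j → PySem.List.pyGetD dp (m : Int) none = some (f m)) →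
      innerA arr (ii : Int) j mh dp
        = PySem.List.pySetD dp (ii : Int)
            (scanT arr f (arr.getD (ii - 1) (0, 0)).1 j mh (PySem.List.pyGetD dp (ii : Int) none)) := by
  intro j
  induction j with
  | zero =>
    intro mh dp _ hlen _
    rw [innerA, scanT, PySem.List.pySetD_natCast, PySem.List.pyGetD_natCast,
      List.getD_eq_getElem dp none hlen]
    exact (List.set_getElem_self hlen).symm
  | succ k ih =>
    intro mh dp hj hlen hread
    have hcast : (ii : Int) - 1 = ((ii - 1 : Nat) : Int) := by omega
    rw [innerA, scanT.eq_def]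
    simp only []
    simp only [hcast, PySem.List.pyGetD_natCast, hread k (Nat.lt_succ_self k), Option.map_some]
    refine Eq.trans (ih _ _ (Nat.le_of_succ_le hj) (by simpa using hlen)
      (by
        intro m hm
        rw [PySem.List.pyGetD_pySetD_natCast _ _ _ _ _ (by simpa using hlen)]
        rw [if_neg (by exact_mod_cast Nat.ne_of_lt (lt_of_lt_of_le hm (Nat.le_of_succ_le hj)))]
        exact hread m (Nat.lt_succ_of_lt hm))) ?_
    rw [PySem.List.pyGetD_pySetD_natCast _ _ _ _ _ (by simpa using hlen), if_pos rfl]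
    rw [PySem.List.pySetD_natCast, PySem.List.pySetD_natCast, PySem.List.pySetD_natCast,
      List.set_set, omin_some]
    simp only [mul_comm]

-- ---- A's outer loop fills dp with the reference values ----
lemma outer_inv (arr : List (Int × Int)) (N : Nat) :
    ∀ k : Nat, k ≤ N →
      ∃ dp, ((List.range k).map (fun m : Nat => ((1 : Int) + (m : Int)))).foldl (fun dp i => innerA arr i i.toNat 0 dp)
              (PySem.List.pySetD (List.replicate (N + 1) (none : Option Int)) 0 (some 0)) = dp ∧
        dp.length = N + 1 ∧
        (∀ m : Nat, m < N + 1 → PySem.List.pyGetD dp (m : Int) none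
            = if m ≤ k then some (bestv arr m) else none) := by
  intro k
  induction k with
  | zero =>
    intro _
    refine ⟨_, rfl, by simp, ?_⟩
    intro m hm
    simp only [List.range_zero, List.map_nil, List.foldl_nil]
    rw [show ((0 : Int)) = (((0 : Nat)) : Int) from rfl]
    rw [PySem.List.pyGetD_pySetD_natCast _ _ _ _ _ (by simp)]
    by_cases hm0 : m = 0
    · subst hm0; simp [bestv, bTab]
    · rw [if_neg (by exact_mod_cast hm0), if_neg (by omega)]
      rw [PySem.List.pyGetD_natCast, List.getD_eq_getElem?_getD, List.getElem?_replicate]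
      split_ifs
      all_goals rfl
  | succ k ih =>
    intro hk
    obtain ⟨dp, hfold, hlen, hget⟩ := ih (Nat.le_of_succ_le hk)
    rw [List.range_succ, List.map_append, List.foldl_append, hfold]
    simp only [List.map_cons, List.map_nil, List.foldl_cons, List.foldl_nil]
    have hcast : ((1 : Int) + (k : Nat)) = (((k + 1 : Nat)) : Int) := by push_cast; ring
    rw [hcast, show ((((k + 1 : Nat)) : Int)).toNat = k + 1 by simp]
    rw [innerA_eq arr (fun m => bestv arr m) (k+1) (k+1) 0 dp (le_refl _) (by omega)
      (by
        intro m hm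
        rw [hget m (by omega), if_pos (by omega)])]
    rw [hget (k+1) (by omega), if_neg (by omega)]
    rw [show (k + 1 - 1 : Nat) = k from rfl, bestv_succ]
    refine ⟨_, rfl, by simpa using hlen, ?_⟩
    intro m hm
    rw [PySem.List.pyGetD_pySetD_natCast _ _ _ _ _ (by omega)]
    by_cases hmk : m = k + 1
    · subst hmk; rw [if_pos rfl, if_pos (le_refl _)]
    · rw [if_neg (by exact_mod_cast hmk), hget m hm]
      split_ifs <;> first | rfl | omega

-- ---- min-folding toolbox ----
lemma foldl_min_min : ∀ (l : List Int) (a b : Int), l.foldl min (min a b) = min a (l.foldl min b) := by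
  intro l
  induction l with
  | nil => intro a b; rfl
  | cons x l ih =>
    intro a b
    simp only [List.foldl_cons]
    rw [min_assoc, ih]

lemma foldl_mstep_some : ∀ (l : List Int) (c : Int), l.foldl mstep (some c) = some (l.foldl min c) := by
  intro l
  induction l with
  | nil => intro c; rfl
  | cons x l ih => intro c; simp only [List.foldl_cons, mstep]; exact ih (min c x)

lemma mstep_cons (c : Int) (l : List Int) :
    (c :: l).foldl mstep none
      = some (match l.foldl mstep none with | none => c | some r => min c r) := by
  cases l with
  | nil => rfl
  | cons x l =>
    simp only [List.foldl_cons, mstep, foldl_mstep_some]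
    congr 1
    show l.foldl min (min c x) = min c (l.foldl min x)
    exact foldl_min_min l c x

lemma foldl_mstep_perm {l l' : List Int} (h : l.Perm l') :
    l.foldl mstep none = l'.foldl mstep none :=
  h.foldl_eq' (fun x _ y _ z => by
    cases z with
    | none => simp only [mstep]; rw [min_comm]
    | some c => simp only [mstep]; rw [min_assoc, min_comm x y, ← min_assoc]) none

-- A's descending scan, unrolled: a min-fold over explicit candidates (running max = maxYF)
lemma scanT_closed (pts : List (Int × Int)) (f : Nat → Int) (x : Int) :
    ∀ (j : Nat) (mh : Int) (cur : Option Int), 0 ≤ mh →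
      scanT pts f x j mh cur
        = (((List.range j).reverse).map
            (fun s => f s + max (x - (pts.getD s (0, 0)).1) (2 * max mh (maxYF pts (j - s) s)))).foldl mstep cur := by
  intro j
  induction j with
  | zero => intro mh cur _; rfl
  | succ k ih =>
    intro mh cur hmh
    rw [scanT.eq_def]
    simp only []
    rw [ih _ _ (le_trans hmh (le_max_left _ _))]
    rw [List.range_succ, List.reverse_append, List.reverse_cons, List.reverse_nil,
      List.nil_append, List.cons_append, List.nil_append, List.map_cons, List.foldl_cons]
    have h1 : max mh (maxYF pts (k + 1 - k) k) = max mh (pts.getD k (0, 0)).2 := by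
      rw [show k + 1 - k = 1 from by omega]
      show max mh (max (pts.getD k (0,0)).2 (maxYF pts 0 (k+1))) = _
      show max mh (max (pts.getD k (0,0)).2 0) = _
      rcases le_total (pts.getD k (0,0)).2 0 with h | h
      · rw [max_eq_right h, max_eq_left hmh, max_eq_left (le_trans h hmh)]
      · rw [max_eq_left h]
    congr 1
    · rw [h1]
      cases cur with
      | none => rfl
      | some c =>
        simp only [mstep]
        congr 1
        rw [min_def]
        split_ifs <;> omega
    · apply List.map_congr_left
      intro s hs
      simp only [List.mem_reverse, List.mem_range] at hs
      rw [show k + 1 - s = (k - s) + 1 from by omega, maxYF_snoc,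
        show s + (k - s) = k from by omega]
      congr 2
      simp only [max_def]
      split_ifs <;> omega

-- ---- B's suffix-max list ----
lemma sufGo_spec (pts : List (Int × Int)) :
    ∀ (t : Nat) (h : Int) (rest : List Int), 0 ≤ h →
      sufGo pts t (h :: rest)
        = (List.range t).map (fun s => max (maxYF pts (t - s) s) h) ++ (h :: rest) := by
  intro t
  induction t with
  | zero => intro h rest _; rfl
  | succ t ih =>
    intro h rest hh
    rw [sufGo]
    simp only [List.headD_cons]
    rw [ih (max (pts.getD t (0,0)).2 h) (h :: rest) (le_trans hh (le_max_right _ _))]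
    rw [List.range_succ, List.map_append]
    simp only [List.map_cons, List.map_nil]
    rw [List.append_assoc]
    congr 1
    · apply List.map_congr_left
      intro s hs
      simp only [List.mem_range] at hs
      rw [show t + 1 - s = (t - s) + 1 from by omega, maxYF_snoc,
        show s + (t - s) = t from by omega, max_assoc]
    · simp only [List.cons_append, List.nil_append]
      congr 1
      rw [show t + 1 - t = 1 from by omega]
      have h1 : maxYF pts 1 t = max (pts.getD t (0, 0)).2 0 := rfl
      rw [h1]
      simp only [max_def]
      split_ifs <;> omega

lemma suf_getD (pts : List (Int × Int)) (i s : Nat) (hs : s < i) :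
    (sufGo pts i [0]).getD s 0 = maxYF pts (i - s) s := by
  rw [sufGo_spec pts i 0 [] (le_refl 0)]
  rw [List.getD_eq_getElem?_getD, List.getElem?_append_left (by simpa using hs)]
  rw [List.getElem?_map, List.getElem?_range hs]
  simp only [Option.map_some, Option.getD_some]
  rcases Nat.lt_or_ge s i with _ | _
  · exact max_eq_left (maxYF_nonneg pts _ s)
  · omega

-- ---- B's recursion computes the reference values, memo invariant threaded ----
lemma solveB_spec (pts : List (Int × Int)) :
    ∀ (i : Nat) (memo : PySem.Dict Int Int), InvM pts memo →
      (solveB pts i memo).1 = bestv pts i ∧ InvM pts (solveB pts i memo).2 := by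
  intro i
  induction i using Nat.strong_induction_on with
  | _ i IH =>
  have inner_spec : ∀ (d j : Nat) (memo : PySem.Dict Int Int), 1 ≤ j → i + 1 - j = d → InvM pts memo →
      (innerB pts (pts.getD (i - 1) (0, 0)).1 (sufGo pts i [0]) i j memo).1
        = ((List.range' j (i + 1 - j)).map
            (fun jj => bestv pts (jj - 1) + max ((pts.getD (i - 1) (0, 0)).1 - (pts.getD (jj - 1) (0, 0)).1)
              (2 * (sufGo pts i [0]).getD (jj - 1) 0))).foldl mstep none ∧
      InvM pts (innerB pts (pts.getD (i - 1) (0, 0)).1 (sufGo pts i [0]) i j memo).2 := by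
    intro d
    induction d with
    | zero =>
      intro j memo hj hd hm
      rw [innerB]
      rw [dif_neg (by omega), hd]
      exact ⟨rfl, hm⟩
    | succ d ihd =>
      intro j memo hj hd hm
      rw [innerB]
      rw [dif_pos (by omega)]
      obtain ⟨hv, hm1⟩ := IH (j - 1) (by omega) memo hm
      obtain ⟨hv2, hm2⟩ := ihd (j + 1) (solveB pts (j-1) memo).2 (by omega) (by omega) hm1
      simp only []
      refine ⟨?_, hm2⟩
      rw [hd, List.range'_succ, List.map_cons, mstep_cons, hv, hv2]
      rw [show i + 1 - (j + 1) = d from by omega]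
  have base : bestv pts 0 = 0 := rfl
  intro memo hm
  rw [solveB]
  by_cases h0 : i = 0
  · subst h0
    rw [if_pos rfl]
    exact ⟨base.symm, hm⟩
  · rw [if_neg h0]
    cases hg : memo.get? (i : Int) with
    | some v =>
      simp only []
      exact ⟨hm i v hg, hm⟩
    | none =>
      simp only []
      obtain ⟨hv, hm'⟩ := inner_spec (i + 1 - 1) 1 memo (le_refl 1) rfl hm
      -- the ascending candidate list equals the reversed descending one of scanT
      have hlist : ((List.range' 1 (i + 1 - 1)).map
            (fun jj => bestv pts (jj - 1) + max ((pts.getD (i - 1) (0, 0)).1 - (pts.getD (jj - 1) (0, 0)).1)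
              (2 * (sufGo pts i [0]).getD (jj - 1) 0))).foldl mstep none
          = some (bestv pts i) := by
        obtain ⟨k, hk⟩ : ∃ k, i = k + 1 := ⟨i - 1, by omega⟩
        subst hk
        have hasc : (List.range' 1 (k + 1 + 1 - 1)).map
              (fun jj => bestv pts (jj - 1) + max ((pts.getD (k + 1 - 1) (0, 0)).1 - (pts.getD (jj - 1) (0, 0)).1)
                (2 * (sufGo pts (k+1) [0]).getD (jj - 1) 0))
            = (List.range (k+1)).map
              (fun s => bestv pts s + max ((pts.getD k (0, 0)).1 - (pts.getD s (0, 0)).1)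
                (2 * max (0:Int) (maxYF pts (k + 1 - s) s))) := by
          rw [show k + 1 + 1 - 1 = k + 1 from rfl]
          rw [List.range'_eq_map_range]
          rw [List.map_map]
          apply List.map_congr_left
          intro s hs
          simp only [List.mem_range] at hs
          simp only [Function.comp]
          rw [show 1 + s - 1 = s from by omega, show k + 1 - 1 = k from rfl]
          rw [suf_getD pts (k+1) s (by omega)]
          rw [max_eq_right (maxYF_nonneg pts _ s)]
        rw [hasc]
        have hdesc := scanT_closed pts (bestv pts) (pts.getD k (0, 0)).1 (k+1) 0 none (le_refl 0)
        rw [bestv_succ pts k] at hdesc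
        rw [hdesc]
        apply foldl_mstep_perm
        rw [show ((List.range (k+1)).reverse.map
              (fun s => bestv pts s + max ((pts.getD k (0, 0)).1 - (pts.getD s (0, 0)).1)
                (2 * max (0:Int) (maxYF pts (k + 1 - s) s))))
            = ((List.range (k+1)).map
              (fun s => bestv pts s + max ((pts.getD k (0, 0)).1 - (pts.getD s (0, 0)).1)
                (2 * max (0:Int) (maxYF pts (k + 1 - s) s)))).reverse from List.map_reverse]
        exact (List.reverse_perm _).symm
      rw [hv, hlist]
      simp only [Option.getD_some]
      refine ⟨trivial, ?_⟩
      intro m v hgv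
      rw [PySem.Dict.get?_insert] at hgv
      by_cases hmi : (m : Int) = (i : Int)
      · rw [if_pos hmi] at hgv
        have : m = i := by exact_mod_cast hmi
        subst this
        exact (Option.some_injective _ hgv).symm
      · rw [if_neg hmi] at hgv
        exact hm' m v hgv

theorem main_eq (n : Int) (array : List (Int × Int)) (h0 : 0 ≤ n) (_hn : n ≤ array.length) :
    min_count n array = min_count_alt n array := by
  simp only [min_count, min_count_alt]
  set pts := PySem.List.sorted2 array (fun p => p.1) (fun p => p.2)
  have hB : (solveB pts n.toNat PySem.Dict.empty).1 = bestv pts n.toNat :=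
    (solveB_spec pts n.toNat PySem.Dict.empty (by intro m v h; simp [PySem.Dict.get?_empty] at h)).1
  rw [hB]
  have hrange : PySem.List.pyRange 1 (n + 1) 1
      = (List.range n.toNat).map (fun m : Nat => ((1 : Int) + (m : Int))) := by
    rw [PySem.List.pyRange_one, show (n + 1 - 1).toNat = n.toNat by omega]
  rw [hrange, show (n + 1).toNat = n.toNat + 1 by omega]
  obtain ⟨dp, hfold, hlen, hget⟩ := outer_inv pts n.toNat n.toNat (le_refl _)
  rw [hfold, show n = ((n.toNat : Nat) : Int) by omega]
  rw [hget n.toNat (by omega), if_pos (le_refl _)]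
  rfl

-- ===== VERDICT (by name: the statement is the Claim_ definition above) =====
theorem min_count_spec : Claim_equal_min_count := by
  intro n array _ hpre
  exact main_eq n array hpre.1 hpre.2
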